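-- pv_equiv track=rewrite | github.com/kawkmin/Python-PS | LV2 귤 고르기.py | solution
-- ===== SOURCE A (Python) =====
-- from collections import Counter
--
-- def solution(k, tangerine):
--     answer = 0
--     for i in sorted(Counter(tangerine).items(), key=lambda x: -x[1]):
--         answer += 1
--         if k <= i[1]:
--             return answer
--         else:
--             k -= i[1]
-- ===== SOURCE B (Python) =====
-- from collections import Counter
-- import bisect
--
-- def solution(k, tangerine):
--     counts = sorted(Counter(tangerine).values(), key=lambda c: -c)
--     prefix = []
--     total = 0
--     for c in counts:
--         total += c
--         prefix.append(total)
--     return bisect.bisect_left(prefix, k) + 1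
-- ===== Notes on version B (the rewrite author's own statement) =====
-- stated objective: alternative
-- what changed: Replaces A's accumulate-and-early-return loop over the sorted (value,count) items with a build-table-then-search shape: sort the Counter's counts descending, build a prefix-sum table, and bisect_left for the first cumulative total >= k.
-- outside the precondition, e.g. on solution(5, []): A returns None, B returns 1; on solution(3, [1, 1]): A returns None, B returns 2
import Mathlib
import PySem

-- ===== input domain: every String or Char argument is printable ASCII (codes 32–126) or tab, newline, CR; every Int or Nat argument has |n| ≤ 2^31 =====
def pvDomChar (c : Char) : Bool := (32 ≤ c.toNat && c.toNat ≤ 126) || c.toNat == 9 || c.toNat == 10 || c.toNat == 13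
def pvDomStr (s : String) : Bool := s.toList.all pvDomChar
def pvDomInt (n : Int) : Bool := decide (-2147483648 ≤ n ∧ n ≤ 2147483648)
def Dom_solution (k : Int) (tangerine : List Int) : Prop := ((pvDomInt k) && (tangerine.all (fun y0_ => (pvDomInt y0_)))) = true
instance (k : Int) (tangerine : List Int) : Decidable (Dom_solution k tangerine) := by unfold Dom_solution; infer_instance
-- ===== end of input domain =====

-- A = accumulate-and-early-return over sorted Counter items; B = prefix-sum table over sorted counts + bisect_left.
-- Equal return values on Pre_ (nonempty list, k ≤ its length); A returns None (no int) outside Pre_.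


-- ===== PORT A =====
-- the for-loop body: 'answer += 1; if k <= i[1]: return answer; else: k -= i[1]'; none = loop fell through (Python returns None)
def loopA : List (Int × Int) → Int → Int → Option Int
  | [], _, _ => none
  | i :: rest, k, answer =>
      if k ≤ i.2 then some (answer + 1) else loopA rest (k - i.2) (answer + 1)

def solution (k : Int) (tangerine : List Int) : Int :=
  (loopA (PySem.List.sorted (PySem.Dict.counter tangerine).items (fun x => -x.2) false) k 0).getD 0

-- ===== PORT B =====
def solution_alt (k : Int) (tangerine : List Int) : Int :=
  let counts := PySem.List.sorted (PySem.Dict.counter tangerine).values (fun c => -c) false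
  let pfx := (counts.foldl (fun (st : List Int × Int) c => (st.1 ++ [st.2 + c], st.2 + c)) ([], 0)).1
  (PySem.List.bisectLeft pfx k : Int) + 1

-- ===== PRECONDITION & SPEC =====
-- Pre_ excludes the empty list and k greater than len(tangerine): there A's loop falls through and
-- Python returns None, which is not an int.
def Pre_solution (k : Int) (tangerine : List Int) : Prop :=
  tangerine ≠ [] ∧ k ≤ (tangerine.length : Int)
instance (k : Int) (tangerine : List Int) : Decidable (Pre_solution k tangerine) := by unfold Pre_solution; infer_instance

def pvWitness_solution : Int × List Int := (3, [1, 2, 2, 1, 3])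

def Spec_solution (k : Int) (tangerine : List Int) (out : Int) : Prop := out = solution_alt k tangerine
instance (k : Int) (tangerine : List Int) (out : Int) : Decidable (Spec_solution k tangerine out) := by unfold Spec_solution; infer_instance

-- ===== CLAIM (what is proved, stated in full; the proofs are below) =====
def Claim_equal_solution : Prop := ∀ (k : Int) (tangerine : List Int), Dom_solution k tangerine → Pre_solution k tangerine → Spec_solution k tangerine (solution k tangerine)

-- ===== LEMMAS AND PROOFS =====

-- "first index i at which the remaining k is ≤ counts[i]" — the value A's loop finds
def pvF : List Int → Int → Option Nat
  | [], _ => none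
  | c :: cs, k => if k ≤ c then some 0 else (pvF cs (k - c)).map (· + 1)

lemma loopA_eq_pvF (l : List (Int × Int)) (k ans : Int) :
    loopA l k ans = (pvF (l.map Prod.snd) k).map (fun i => ans + (i : Int) + 1) := by
  induction l generalizing k ans with
  | nil => rfl
  | cons p rest ih =>
      simp only [loopA, List.map_cons, pvF]
      by_cases h : k ≤ p.2
      · simp [h]
      · rw [if_neg h, if_neg h, ih]
        cases pvF (rest.map Prod.snd) (k - p.2) with
        | none => rfl
        | some m => simp; ring

-- prefix sums with running total t
def pvPre : List Int → Int → List Int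
  | [], _ => []
  | c :: cs, t => (t + c) :: pvPre cs (t + c)

lemma foldl_prefix (l : List Int) (acc : List Int) (t : Int) :
    (l.foldl (fun (st : List Int × Int) c => (st.1 ++ [st.2 + c], st.2 + c)) (acc, t)).1
      = acc ++ pvPre l t := by
  induction l generalizing acc t with
  | nil => simp [pvPre]
  | cons c cs ih => simp [pvPre, List.foldl_cons, ih]

lemma mem_pvPre {cs : List Int} {t y : Int} (h : ∀ c ∈ cs, 1 ≤ c) (hy : y ∈ pvPre cs t) : t < y := by
  induction cs generalizing t with
  | nil => simp [pvPre] at hy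
  | cons c cs ih =>
      have hc : 1 ≤ c := h c (by simp)
      rcases (by simpa [pvPre] using hy : y = t + c ∨ y ∈ pvPre cs (t + c)) with rfl | hy'
      · omega
      · have := ih (fun x hx => h x (by simp [hx])) hy'
        omega

lemma pairwise_pvPre {cs : List Int} (h : ∀ c ∈ cs, 1 ≤ c) (t : Int) :
    (pvPre cs t).Pairwise (fun a b => a ≤ b) := by
  induction cs generalizing t with
  | nil => simp [pvPre]
  | cons c cs ih =>
      refine List.Pairwise.cons (fun y hy => ?_) (ih (fun x hx => h x (by simp [hx])) (t + c))
      exact le_of_lt (mem_pvPre (fun x hx => h x (by simp [hx])) hy)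

lemma length_pvPre (cs : List Int) (t : Int) : (pvPre cs t).length = cs.length := by
  induction cs generalizing t with
  | nil => rfl
  | cons c cs ih => simp [pvPre, ih]

lemma bisect_eq_of (xs : List Int) (x : Int) (hs : xs.Pairwise (fun a b => a ≤ b)) (n : Nat)
    (hn : n ≤ xs.length)
    (h1 : ∀ (j : Nat) (hj : j < xs.length), j < n → xs[j] < x)
    (h2 : ∀ (j : Nat) (hj : j < xs.length), n ≤ j → x ≤ xs[j]) :
    PySem.List.bisectLeft xs x = n := by
  obtain ⟨hm, hlo, hhi⟩ := PySem.List.bisectLeft_spec xs x hs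
  rcases Nat.lt_trichotomy (PySem.List.bisectLeft xs x) n with hlt | heq | hgt
  · have hj : PySem.List.bisectLeft xs x < xs.length := lt_of_lt_of_le hlt hn
    have := h1 _ hj hlt
    have := hhi _ hj le_rfl
    omega
  · exact heq
  · have hj : n < xs.length := lt_of_lt_of_le hgt hm
    have := hlo _ hj hgt
    have := h2 _ hj le_rfl
    omega

lemma pvF_lt_length {cs : List Int} {k : Int} {n : Nat} (h : pvF cs k = some n) : n < cs.length := by
  induction cs generalizing k n with
  | nil => simp [pvF] at h
  | cons c cs ih =>
      simp only [pvF] at h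
      by_cases hk : k ≤ c
      · rw [if_pos hk] at h
        simp at h
        simp [← h]
      · rw [if_neg hk, Option.map_eq_some_iff] at h
        obtain ⟨m, hm, rfl⟩ := h
        have := ih hm
        simp; omega

lemma pvF_bisect {cs : List Int} (h : ∀ c ∈ cs, 1 ≤ c) {k : Int} {n : Nat} (t : Int)
    (hF : pvF cs k = some n) :
    PySem.List.bisectLeft (pvPre cs t) (t + k) = n := by
  induction cs generalizing k n t with
  | nil => simp [pvF] at hF
  | cons c cs ih =>
      have hpos : ∀ x ∈ cs, 1 ≤ x := fun x hx => h x (by simp [hx])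
      have hpw : (pvPre (c :: cs) t).Pairwise (fun a b => a ≤ b) := pairwise_pvPre h t
      simp only [pvF] at hF
      by_cases hk : k ≤ c
      · rw [if_pos hk] at hF
        have hn0 : n = 0 := by simpa using hF.symm
        subst hn0
        refine bisect_eq_of _ _ hpw 0 (by simp) (by omega) ?_
        intro j hj _
        simp only [pvPre] at hj ⊢
        match j, hj with
        | 0, hj => simp only [List.getElem_cons_zero]; omega
        | j + 1, hj =>
            have hj' : j < (pvPre cs (t + c)).length := by
              simpa using Nat.lt_of_succ_lt_succ hj
            simp only [List.getElem_cons_succ]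
            have := mem_pvPre hpos (List.getElem_mem hj')
            omega
      · rw [if_neg hk, Option.map_eq_some_iff] at hF
        obtain ⟨m, hm, rfl⟩ := hF
        have hmlen : m < cs.length := pvF_lt_length hm
        have hrec : PySem.List.bisectLeft (pvPre cs (t + c)) ((t + c) + (k - c)) = m :=
          ih hpos (t + c) hm
        have hkey : (t + c) + (k - c) = t + k := by ring
        rw [hkey] at hrec
        obtain ⟨_, hlo, hhi⟩ :=
          PySem.List.bisectLeft_spec (pvPre cs (t + c)) (t + k) (pairwise_pvPre hpos (t + c))
        rw [hrec] at hlo hhi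
        refine bisect_eq_of _ _ hpw (m + 1) (by simp [pvPre, length_pvPre]; omega) ?_ ?_
        · intro j hj hjm
          simp only [pvPre] at hj ⊢
          match j, hj, hjm with
          | 0, hj, hjm => simp only [List.getElem_cons_zero]; omega
          | j + 1, hj, hjm =>
              have hj' : j < (pvPre cs (t + c)).length := Nat.lt_of_succ_lt_succ (by simpa using hj)
              simp only [List.getElem_cons_succ]
              exact hlo j hj' (by omega)
        · intro j hj hjm
          simp only [pvPre] at hj ⊢
          match j, hj, hjm with
          | 0, hj, hjm => omega
          | j + 1, hj, hjm =>
              have hj' : j < (pvPre cs (t + c)).length := Nat.lt_of_succ_lt_succ (by simpa using hj)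
              simp only [List.getElem_cons_succ]
              exact hhi j hj' (by omega)

lemma pvF_some {cs : List Int} (hne : cs ≠ []) {k : Int} (hk : k ≤ cs.sum) :
    ∃ n, pvF cs k = some n := by
  induction cs generalizing k with
  | nil => exact absurd rfl hne
  | cons c cs ih =>
      by_cases h : k ≤ c
      · exact ⟨0, by simp [pvF, h]⟩
      · cases cs with
        | nil => simp at hk; omega
        | cons c' cs' =>
            obtain ⟨m, hm⟩ := ih (by simp) (k := k - c) (by simp at hk ⊢; omega)
            refine ⟨m + 1, ?_⟩
            rw [pvF, if_neg h, hm]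
            rfl

lemma insertBy_map {α β : Type} (f : α → β) (g : β → β → Bool) (x : α) (l : List α) :
    PySem.List.insertBy g (f x) (l.map f) = (PySem.List.insertBy (fun a b => g (f a) (f b)) x l).map f := by
  induction l with
  | nil => rfl
  | cons y ys ih =>
      simp only [List.map_cons, PySem.List.insertBy]
      by_cases h : g (f x) (f y)
      · simp [h]
      · simp [h, ih]

lemma foldl_insertBy_map {α β : Type} (f : α → β) (g : β → β → Bool) (xs : List α) (acc : List α) :
    xs.foldl (fun a x => PySem.List.insertBy g (f x) a) (acc.map f)
      = (xs.foldl (fun a x => PySem.List.insertBy (fun a b => g (f a) (f b)) x a) acc).map f := by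
  induction xs generalizing acc with
  | nil => rfl
  | cons x xs ih => simp only [List.foldl_cons, insertBy_map, ih]

lemma sorted_map {α β : Type} (xs : List α) (f : α → β) (key : β → Int) (rev : Bool) :
    PySem.List.sorted (xs.map f) key rev = (PySem.List.sorted xs (fun a => key (f a)) rev).map f := by
  cases rev <;>
    simpa [PySem.List.sorted, List.foldl_map] using
      foldl_insertBy_map f _ xs []

lemma values_counter_sorted (t : List Int) :
    PySem.List.sorted (PySem.Dict.counter t).values (fun c => -c) false
      = (PySem.List.sorted (PySem.Dict.counter t).items (fun x => -x.2) false).map (fun x => x.2) := by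
  have hvals : (PySem.Dict.counter t).values
      = ((PySem.Dict.counter t).items).map (fun x => x.2) := rfl
  rw [hvals, sorted_map]

lemma cs_pos (t : List Int) :
    ∀ c ∈ (PySem.List.sorted (PySem.Dict.counter t).items (fun x => -x.2) false).map (fun x => x.2),
      1 ≤ c := by
  intro c hc
  rw [List.mem_map] at hc
  obtain ⟨p, hp, rfl⟩ := hc
  rw [PySem.List.mem_sorted, PySem.Dict.items_counter, List.mem_map] at hp
  obtain ⟨v, hv, rfl⟩ := hp
  have : 0 < t.count v := List.count_pos_iff.mpr ((PySem.Set.mem_ofList t v).mp hv)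
  simpa using this

lemma cs_sum (t : List Int) :
    ((PySem.List.sorted (PySem.Dict.counter t).items (fun x => -x.2) false).map (fun x => x.2)).sum
      = (t.length : Int) := by
  classical
  have hperm : ((PySem.List.sorted (PySem.Dict.counter t).items (fun x => -x.2) false).map
      (fun x => x.2)).Perm ((PySem.Dict.counter t).items.map (fun x => x.2)) :=
    (PySem.List.sorted_perm _ _ _).map _
  rw [hperm.sum_eq, PySem.Dict.items_counter, List.map_map]
  have hperm2 : (PySem.Set.ofList t).Perm t.dedup := by
    rw [List.perm_ext_iff_of_nodup (PySem.Set.nodup_ofList t) t.nodup_dedup]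
    intro a
    rw [PySem.Set.mem_ofList, List.mem_dedup]
  have : ((PySem.Set.ofList t).map (fun v => (t.count v : Int))).sum
      = ((t.dedup.map (fun v => (t.count v : Int)))).sum := (hperm2.map _).sum_eq
  rw [show ((fun x => x.2) ∘ fun k => (k, (t.count k : Int))) = fun v => (t.count v : Int) from rfl,
      this]
  have hn : (t.dedup.map (fun v => (t.count v : Int))).sum
      = ((t.dedup.map (fun v => t.count v)).sum : Nat) := by
    rw [Nat.cast_list_sum, List.map_map]
    rfl
  rw [hn, List.sum_map_count_dedup_eq_length]

lemma cs_ne_nil (t : List Int) (hne : t ≠ []) :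
    (PySem.List.sorted (PySem.Dict.counter t).items (fun x => -x.2) false).map (fun x => x.2)
      ≠ [] := by
  intro h
  have hlen := congrArg List.length h
  rw [List.length_map, (PySem.List.sorted_perm _ _ _).length_eq, PySem.Dict.items_counter,
      List.length_map] at hlen
  cases t with
  | nil => exact hne rfl
  | cons x xs =>
      have : x ∈ PySem.Set.ofList (x :: xs) := (PySem.Set.mem_ofList _ _).mpr (by simp)
      rw [List.length_eq_zero_iff.mp hlen] at this
      simp at this

-- ===== VERDICT (by name: the statement is the Claim_ definition above) =====
theorem solution_spec : Claim_equal_solution := by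
  intro k t _ hpre
  obtain ⟨hne, hk⟩ := hpre
  show solution k t = solution_alt k t
  set cs := (PySem.List.sorted (PySem.Dict.counter t).items (fun x => -x.2) false).map
      (fun x => x.2) with hcs
  obtain ⟨n, hn⟩ := pvF_some (cs_ne_nil t hne) (k := k) (by rw [cs_sum]; exact hk)
  have hA : solution k t = 0 + (n : Int) + 1 := by
    rw [solution, loopA_eq_pvF, ← hcs, hn]
    rfl
  have hB : solution_alt k t = (n : Int) + 1 := by
    rw [solution_alt]
    simp only [values_counter_sorted t, ← hcs, foldl_prefix, List.nil_append]
    have := pvF_bisect (cs_pos t) (cs := cs) (k := k) (n := n) 0 hn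
    rw [zero_add] at this
    rw [this]
  rw [hA, hB]
  ring
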